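-- pv_equiv track=rewrite | github.com/devaprasadnm/ResumeBuilder | app.py | parse_resume_text
-- ===== SOURCE A (Python) =====
-- def parse_resume_text(text):
--     """Parse resume text and extract key information"""
--     data = {
--         'name': '',
--         'email': '',
--         'phone': '',
--         'location': '',
--         'linkedin': '',
--         'github': '',
--         'portfolio': '',
--         'summary': ''
--     }
--
--     lines = text.split('\n')
--
--     # Extract information from lines
--     for i, line in enumerate(lines):
--         line = line.strip()
--
--         # Email extraction
--         if '@' in line and ('.' in line or 'gmail' in line.lower() or 'yahoo' in line.lower()):
--             if not data['email']:
--                 data['email'] = line.split()[0] if ' ' in line else line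
--
--         # Phone extraction
--         if ('+' in line or '-' in line) and any(c.isdigit() for c in line):
--             if len(line) < 20 and any(c.isdigit() for c in line):
--                 if not data['phone']:
--                     data['phone'] = line
--
--         # LinkedIn extraction
--         if 'linkedin' in line.lower():
--             if not data['linkedin']:
--                 data['linkedin'] = line.strip()
--
--         # GitHub extraction
--         if 'github' in line.lower():
--             if not data['github']:
--                 data['github'] = line.strip()
--
--         # Portfolio extraction
--         if 'portfolio' in line.lower() or 'website' in line.lower():
--             if not data['portfolio']:
--                 data['portfolio'] = line.strip()
--
--         # Try to extract name from first non-empty line if no name yet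
--         if not data['name'] and i < 5 and len(line) > 2 and len(line) < 100:
--             if not any(c.isdigit() for c in line) and '@' not in line and '+' not in line:
--                 data['name'] = line
--
--     return data
-- ===== SOURCE B (Python) =====
-- def parse_resume_text(text):
--     """Parse resume text and extract key information"""
--     lines = [l.strip() for l in text.split('\n')]
--
--     def first(pred):
--         for l in lines:
--             if pred(l):
--                 return l
--         return ''
--
--     email_line = first(lambda l: '@' in l and
--                        ('.' in l or 'gmail' in l.lower() or 'yahoo' in l.lower()))
--     email = email_line.split()[0] if ' ' in email_line else email_line
--
--     phone = first(lambda l: ('+' in l or '-' in l)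
--                   and any(c.isdigit() for c in l) and len(l) < 20)
--     linkedin = first(lambda l: 'linkedin' in l.lower())
--     github = first(lambda l: 'github' in l.lower())
--     portfolio = first(lambda l: 'portfolio' in l.lower() or 'website' in l.lower())
--
--     name = ''
--     for l in lines[:5]:
--         if 2 < len(l) < 100 and not any(c.isdigit() for c in l) \
--                 and '@' not in l and '+' not in l:
--             name = l
--             break
--
--     return {
--         'name': name,
--         'email': email,
--         'phone': phone,
--         'location': '',
--         'linkedin': linkedin,
--         'github': github,
--         'portfolio': portfolio,
--         'summary': '',
--     }
-- ===== Notes on version B (the rewrite author's own statement) =====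
-- stated objective: simpler
-- what changed: A's single fused loop threading a mutable dict with first-assignment guards is replaced by one independent first-match scan per field (a shared first(pred) helper plus a bounded name loop over lines[:5]), with the result dict assembled at the end.
import Mathlib
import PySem

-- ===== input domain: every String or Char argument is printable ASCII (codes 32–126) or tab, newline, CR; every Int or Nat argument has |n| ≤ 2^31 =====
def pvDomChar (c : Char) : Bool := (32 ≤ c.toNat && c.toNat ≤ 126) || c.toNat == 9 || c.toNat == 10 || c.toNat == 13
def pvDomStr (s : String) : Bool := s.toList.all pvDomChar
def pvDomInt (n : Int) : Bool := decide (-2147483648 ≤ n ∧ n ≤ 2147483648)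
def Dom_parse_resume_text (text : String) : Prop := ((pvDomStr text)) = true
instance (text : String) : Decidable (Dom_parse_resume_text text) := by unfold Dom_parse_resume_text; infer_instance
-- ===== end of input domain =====

-- B replaces A's single fused loop-with-dict-state by one independent first-match scan per field
-- (objective: simpler decomposition; same values).

-- shared char-level helper: any(c.isdigit() for c in s); per-char c.isdigit() is Chars.strIsdigit on the 1-char string
def pyAnyDigit (s : String) : Bool := s.toList.any (fun c => PySem.Chars.strIsdigit [c])

-- ===== PORT A =====
-- one step of A's loop body: (i, raw line) updates the dict (all 8 keys are always present,
-- so Python's data['k'] reads are ported as getD with an unreachable default)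
def stepA (d : PySem.Dict String String) (il : Int × String) : PySem.Dict String String :=
  let i := il.1
  let line := PySem.Str.strip il.2
  let d1 :=
    if PySem.Str.isIn "@" line &&
        (PySem.Str.isIn "." line || PySem.Str.isIn "gmail" (PySem.Str.lower line) ||
          PySem.Str.isIn "yahoo" (PySem.Str.lower line)) then
      if PySem.Dict.getD d "email" "" == "" then
        PySem.Dict.insert d "email"
          (if PySem.Str.isIn " " line then PySem.List.pyGetD (PySem.Str.split₀ line) 0 "" else line)
      else d
    else d
  let d2 :=
    if (PySem.Str.isIn "+" line || PySem.Str.isIn "-" line) && pyAnyDigit line then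
      if decide (PySem.Str.len line < 20) && pyAnyDigit line then
        if PySem.Dict.getD d1 "phone" "" == "" then PySem.Dict.insert d1 "phone" line else d1
      else d1
    else d1
  let d3 :=
    if PySem.Str.isIn "linkedin" (PySem.Str.lower line) then
      if PySem.Dict.getD d2 "linkedin" "" == "" then
        PySem.Dict.insert d2 "linkedin" (PySem.Str.strip line)
      else d2
    else d2
  let d4 :=
    if PySem.Str.isIn "github" (PySem.Str.lower line) then
      if PySem.Dict.getD d3 "github" "" == "" then
        PySem.Dict.insert d3 "github" (PySem.Str.strip line)
      else d3
    else d3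
  let d5 :=
    if PySem.Str.isIn "portfolio" (PySem.Str.lower line) || PySem.Str.isIn "website" (PySem.Str.lower line) then
      if PySem.Dict.getD d4 "portfolio" "" == "" then
        PySem.Dict.insert d4 "portfolio" (PySem.Str.strip line)
      else d4
    else d4
  let d6 :=
    if PySem.Dict.getD d5 "name" "" == "" && decide (i < 5) &&
        decide (2 < PySem.Str.len line) && decide (PySem.Str.len line < 100) then
      if !pyAnyDigit line && !PySem.Str.isIn "@" line && !PySem.Str.isIn "+" line then
        PySem.Dict.insert d5 "name" line
      else d5
    else d5
  d6

def parse_resume_text (text : String) : List (String × String) :=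
  let data0 : PySem.Dict String String :=
    PySem.Dict.ofList [("name", ""), ("email", ""), ("phone", ""), ("location", ""),
      ("linkedin", ""), ("github", ""), ("portfolio", ""), ("summary", "")]
  let lines := (PySem.Str.split? text "\n").getD []   -- sep "\n" ≠ "", so split? is never none
  ((PySem.List.enumerate lines 0).foldl stepA data0).items

-- ===== PORT B =====
-- B's per-field predicates (Source B's lambdas) on an already-stripped line
def emailP (l : String) : Bool :=
  PySem.Str.isIn "@" l &&
    (PySem.Str.isIn "." l || PySem.Str.isIn "gmail" (PySem.Str.lower l) ||
      PySem.Str.isIn "yahoo" (PySem.Str.lower l))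
def phoneP (l : String) : Bool :=
  (PySem.Str.isIn "+" l || PySem.Str.isIn "-" l) && pyAnyDigit l && decide (PySem.Str.len l < 20)
def linkP (l : String) : Bool := PySem.Str.isIn "linkedin" (PySem.Str.lower l)
def gitP (l : String) : Bool := PySem.Str.isIn "github" (PySem.Str.lower l)
def portP (l : String) : Bool :=
  PySem.Str.isIn "portfolio" (PySem.Str.lower l) || PySem.Str.isIn "website" (PySem.Str.lower l)
def nameP (l : String) : Bool :=
  decide (2 < PySem.Str.len l) && decide (PySem.Str.len l < 100) && !pyAnyDigit l &&
    !PySem.Str.isIn "@" l && !PySem.Str.isIn "+" l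

-- Source B's first(pred): first line satisfying pred, default ''
def firstMatch (p : String → Bool) : List String → String
  | [] => ""
  | l :: t => if p l then l else firstMatch p t

-- Source B's name loop over lines[:5]
def firstName : List String → String
  | [] => ""
  | l :: t => if nameP l then l else firstName t

def parse_resume_text_alt (text : String) : List (String × String) :=
  let lines := ((PySem.Str.split? text "\n").getD []).map PySem.Str.strip
  let emailLine := firstMatch emailP lines
  let email :=
    if PySem.Str.isIn " " emailLine then PySem.List.pyGetD (PySem.Str.split₀ emailLine) 0 ""
    else emailLine
  let phone := firstMatch phoneP lines
  let linkedin := firstMatch linkP lines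
  let github := firstMatch gitP lines
  let portfolio := firstMatch portP lines
  let name := firstName (PySem.List.slice lines none (some 5))
  [("name", name), ("email", email), ("phone", phone), ("location", ""),
    ("linkedin", linkedin), ("github", github), ("portfolio", portfolio), ("summary", "")]

-- ===== PRECONDITION & SPEC =====
def Spec_parse_resume_text (text : String) (out : List (String × String)) : Prop := out = parse_resume_text_alt text
instance (text : String) (out : List (String × String)) : Decidable (Spec_parse_resume_text text out) := by unfold Spec_parse_resume_text; infer_instance

-- ===== CLAIM (what is proved, stated in full; the proofs are below) =====
def Claim_equal_parse_resume_text : Prop := ∀ (text : String), Dom_parse_resume_text text → Spec_parse_resume_text text (parse_resume_text text)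

-- ===== LEMMAS AND PROOFS =====
-- the dict A's loop maintains: always the 8 literal keys, location/summary stay ''
def mkD (n e p lk gh pf : String) : PySem.Dict String String :=
  PySem.Dict.ofList [("name", n), ("email", e), ("phone", p), ("location", ""),
    ("linkedin", lk), ("github", gh), ("portfolio", pf), ("summary", "")]

-- A's stored email value for a matching line
def emailVal (l : String) : String :=
  if PySem.Str.isIn " " l then PySem.List.pyGetD (PySem.Str.split₀ l) 0 "" else l

-- A's name scan from running index i over the raw lines
def nameFrom (i : Int) : List String → String
  | [] => ""
  | l :: t =>
    if i < 5 ∧ nameP (PySem.Str.strip l) = true then PySem.Str.strip l else nameFrom (i + 1) t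

lemma dict_eq_of_items {κ ν : Type} (d d' : PySem.Dict κ ν) (h : d.items = d'.items) :
    d = d' := by cases d; cases d'; simpa using h

lemma mkD_congr {n n' e e' p p' lk lk' gh gh' pf pf' : String}
    (h1 : n = n') (h2 : e = e') (h3 : p = p') (h4 : lk = lk') (h5 : gh = gh') (h6 : pf = pf') :
    mkD n e p lk gh pf = mkD n' e' p' lk' gh' pf' := by
  subst h1; subst h2; subst h3; subst h4; subst h5; subst h6; rfl

lemma items_mkD (n e p lk gh pf : String) :
    (mkD n e p lk gh pf).items = [("name", n), ("email", e), ("phone", p), ("location", ""),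
      ("linkedin", lk), ("github", gh), ("portfolio", pf), ("summary", "")] := by
  simp [mkD, PySem.Dict.ofList, PySem.Dict.update, PySem.Dict.insert, PySem.Dict.contains,
    PySem.Dict.empty]

-- getD / insert on the loop's dict, per key
lemma getD_name (n e p lk gh pf : String) : (mkD n e p lk gh pf).getD "name" "" = n := by
  simp [PySem.Dict.getD, PySem.Dict.get?, items_mkD]
lemma getD_email (n e p lk gh pf : String) : (mkD n e p lk gh pf).getD "email" "" = e := by
  simp [PySem.Dict.getD, PySem.Dict.get?, items_mkD]
lemma getD_phone (n e p lk gh pf : String) : (mkD n e p lk gh pf).getD "phone" "" = p := by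
  simp [PySem.Dict.getD, PySem.Dict.get?, items_mkD]
lemma getD_link (n e p lk gh pf : String) : (mkD n e p lk gh pf).getD "linkedin" "" = lk := by
  simp [PySem.Dict.getD, PySem.Dict.get?, items_mkD]
lemma getD_git (n e p lk gh pf : String) : (mkD n e p lk gh pf).getD "github" "" = gh := by
  simp [PySem.Dict.getD, PySem.Dict.get?, items_mkD]
lemma getD_port (n e p lk gh pf : String) : (mkD n e p lk gh pf).getD "portfolio" "" = pf := by
  simp [PySem.Dict.getD, PySem.Dict.get?, items_mkD]
lemma insert_name (n e p lk gh pf v : String) :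
    (mkD n e p lk gh pf).insert "name" v = mkD v e p lk gh pf := by
  apply dict_eq_of_items
  simp [PySem.Dict.insert, PySem.Dict.contains, items_mkD]
lemma insert_email (n e p lk gh pf v : String) :
    (mkD n e p lk gh pf).insert "email" v = mkD n v p lk gh pf := by
  apply dict_eq_of_items
  simp [PySem.Dict.insert, PySem.Dict.contains, items_mkD]
lemma insert_phone (n e p lk gh pf v : String) :
    (mkD n e p lk gh pf).insert "phone" v = mkD n e v lk gh pf := by
  apply dict_eq_of_items
  simp [PySem.Dict.insert, PySem.Dict.contains, items_mkD]
lemma insert_link (n e p lk gh pf v : String) :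
    (mkD n e p lk gh pf).insert "linkedin" v = mkD n e p v gh pf := by
  apply dict_eq_of_items
  simp [PySem.Dict.insert, PySem.Dict.contains, items_mkD]
lemma insert_git (n e p lk gh pf v : String) :
    (mkD n e p lk gh pf).insert "github" v = mkD n e p lk v pf := by
  apply dict_eq_of_items
  simp [PySem.Dict.insert, PySem.Dict.contains, items_mkD]
lemma insert_port (n e p lk gh pf v : String) :
    (mkD n e p lk gh pf).insert "portfolio" v = mkD n e p lk gh v := by
  apply dict_eq_of_items
  simp [PySem.Dict.insert, PySem.Dict.contains, items_mkD]

lemma dropWhile_idem {α : Type} (p : α → Bool) (l : List α) :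
    List.dropWhile p (List.dropWhile p l) = List.dropWhile p l := by
  induction l with
  | nil => rfl
  | cons x t ih =>
    rw [List.dropWhile_cons]
    by_cases h : p x = true
    · simp [h, ih]
    · simp [h]

lemma dropWhile_of_prefix {α : Type} (p : α → Bool) (u l : List α)
    (hu : u <+: l) (hl : List.dropWhile p l = l) : List.dropWhile p u = u := by
  cases u with
  | nil => rfl
  | cons x u' =>
    obtain ⟨r, rfl⟩ := hu
    rw [List.cons_append, List.dropWhile_cons] at hl
    by_cases h : p x = true
    · exfalso
      simp [h] at hl
      have := congrArg List.length hl
      have hle := List.length_dropWhile_le p (u' ++ r)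
      simp at this hle; omega
    · rw [List.dropWhile_cons]; simp [h]

lemma chars_strip_idem (s : List Char) :
    PySem.Chars.strip (PySem.Chars.strip s) = PySem.Chars.strip s := by
  unfold PySem.Chars.strip PySem.Chars.rstrip PySem.Chars.lstrip
  set p := PySem.Chars.isspace
  set t := List.dropWhile p s with ht
  have hrt : (List.dropWhile p t.reverse).reverse <+: t := by
    rw [← List.reverse_reverse t, List.reverse_prefix, List.reverse_reverse]
    exact List.dropWhile_suffix p
  have hdt : List.dropWhile p t = t := dropWhile_idem p s
  have h1 : List.dropWhile p (List.dropWhile p t.reverse).reverse =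
      (List.dropWhile p t.reverse).reverse := dropWhile_of_prefix p _ t hrt hdt
  rw [h1, List.reverse_reverse, dropWhile_idem]

lemma strip_idem (s : String) : PySem.Str.strip (PySem.Str.strip s) = PySem.Str.strip s := by
  unfold PySem.Str.strip
  rw [String.toList_ofList, chars_strip_idem]

lemma go_tokens (s : List Char) : ∀ (cur : List Char) (acc : List (List Char)),
    (∀ w ∈ acc, w ≠ []) → ∀ w ∈ PySem.Chars.split₀.go s cur acc, w ≠ [] := by
  induction s with
  | nil =>
    intro cur acc hacc w hw
    rw [PySem.Chars.split₀.go] at hw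
    by_cases hc : cur.isEmpty = true
    · simp [hc] at hw; exact hacc w (List.mem_reverse.mp (by simpa using hw))
    · simp [hc] at hw
      rcases hw with h | h
      · exact hacc w h
      · subst h; simpa [List.isEmpty_iff] using hc
  | cons c rest ih =>
    intro cur acc hacc w hw
    rw [PySem.Chars.split₀.go] at hw
    by_cases hs : PySem.Chars.isspace c = true
    · by_cases hc : cur.isEmpty = true
      · simp [hs, hc] at hw; exact ih [] acc hacc w hw
      · simp [hs, hc] at hw
        refine ih [] (cur.reverse :: acc) ?_ w hw
        intro u hu
        rcases List.mem_cons.mp hu with h | h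
        · subst h; simpa [List.isEmpty_iff] using hc
        · exact hacc u h
    · simp [hs] at hw
      exact ih (c :: cur) acc hacc w hw

lemma go_ne_nil (s : List Char) : ∀ (cur : List Char) (acc : List (List Char)),
    ((∃ c ∈ s, PySem.Chars.isspace c = false) ∨ cur ≠ [] ∨ acc ≠ []) →
    PySem.Chars.split₀.go s cur acc ≠ [] := by
  induction s with
  | nil =>
    intro cur acc h
    rw [PySem.Chars.split₀.go]
    by_cases hc : cur.isEmpty = true
    · have hcur : cur = [] := List.isEmpty_iff.mp hc
      simp [hc]
      rcases h with ⟨c, hc', _⟩ | h | h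
      · exact absurd hc' (List.not_mem_nil)
      · exact absurd hcur h
      · simpa using h
    · simp [hc]
  | cons c rest ih =>
    intro cur acc h
    rw [PySem.Chars.split₀.go]
    by_cases hs : PySem.Chars.isspace c = true
    · by_cases hc : cur.isEmpty = true
      · simp [hs, hc]
        refine ih [] acc ?_
        rcases h with ⟨c', hc', hns⟩ | h | h
        · rcases List.mem_cons.mp hc' with rfl | hm
          · rw [hs] at hns; exact absurd hns (by simp)
          · exact Or.inl ⟨c', hm, hns⟩
        · exact absurd (List.isEmpty_iff.mp hc) h
        · exact Or.inr (Or.inr h)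
      · simp [hs, hc]
        exact ih [] (cur.reverse :: acc) (Or.inr (Or.inr (by simp)))
    · simp [hs]
      exact ih (c :: cur) acc (Or.inr (Or.inl (by simp)))

lemma at_mem (l : String) (h : PySem.Str.isIn "@" l = true) : '@' ∈ l.toList := by
  have := (PySem.Str.isIn_iff_infix _ _).mp h
  have hs : ("@" : String).toList = ['@'] := by decide
  rw [hs] at this
  exact List.singleton_sublist.mp this.sublist

lemma ne_empty_of_mem (l : String) (c : Char) (h : c ∈ l.toList) : l ≠ "" := by
  intro he; subst he; simp at h

lemma emailVal_ne_empty (l : String) (h : emailP l = true) : emailVal l ≠ "" := by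
  have hat : PySem.Str.isIn "@" l = true := by
    unfold emailP at h; exact (Bool.and_eq_true _ _ |>.mp h).1
  have hmem := at_mem l hat
  unfold emailVal
  by_cases hsp : PySem.Str.isIn " " l = true
  · rw [if_pos hsp]
    have hbridge := PySem.Str.split₀_map_toList l
    have hnn : PySem.Chars.split₀ l.toList ≠ [] := by
      unfold PySem.Chars.split₀
      exact go_ne_nil _ _ _ (Or.inl ⟨'@', hmem, by decide⟩)
    cases hw : PySem.Str.split₀ l with
    | nil => rw [hw] at hbridge; simp at hbridge; exact absurd hbridge.symm (Ne.symm hnn)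
    | cons w ws =>
      rw [PySem.List.pyGetD_zero_cons]
      have hwl : w.toList ∈ PySem.Chars.split₀ l.toList := by
        rw [← hbridge, hw]; simp
      have : w.toList ≠ [] := by
        unfold PySem.Chars.split₀ at hwl
        exact go_tokens _ _ _ (by intro u hu; simp at hu) _ hwl
      exact fun he => this (by rw [he]; rfl)
  · rw [if_neg hsp]
    exact ne_empty_of_mem l '@' hmem

lemma phoneP_ne_empty (l : String) (h : phoneP l = true) : l ≠ "" := by
  intro he; subst he; exact absurd h (by decide)
lemma linkP_ne_empty (l : String) (h : linkP l = true) : l ≠ "" := by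
  intro he; subst he; exact absurd h (by decide)
lemma gitP_ne_empty (l : String) (h : gitP l = true) : l ≠ "" := by
  intro he; subst he; exact absurd h (by decide)
lemma portP_ne_empty (l : String) (h : portP l = true) : l ≠ "" := by
  intro he; subst he; exact absurd h (by decide)
lemma nameP_ne_empty (l : String) (h : nameP l = true) : l ≠ "" := by
  intro he; subst he; exact absurd h (by decide)


-- single-field updates of one loop iteration, condition kept as an opaque Bool
lemma updE (b : Bool) (v n e p lk gh pf : String) :
    (if b then
      (if (mkD n e p lk gh pf).getD "email" "" == "" then (mkD n e p lk gh pf).insert "email" v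
       else mkD n e p lk gh pf)
     else mkD n e p lk gh pf) = mkD n (if b = true ∧ e = "" then v else e) p lk gh pf := by
  by_cases hb : b = true
  · by_cases he : e = "" <;> simp [hb, he, getD_email, insert_email]
  · simp [hb]

lemma updP (o inn : Bool) (v n e p lk gh pf : String) :
    (if o then
      (if inn then
        (if (mkD n e p lk gh pf).getD "phone" "" == "" then (mkD n e p lk gh pf).insert "phone" v
         else mkD n e p lk gh pf)
       else mkD n e p lk gh pf)
     else mkD n e p lk gh pf) = mkD n e (if (o && inn) = true ∧ p = "" then v else p) lk gh pf := by
  by_cases ho : o = true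
  · by_cases hi : inn = true
    · by_cases hp : p = "" <;> simp [ho, hi, hp, getD_phone, insert_phone]
    · simp [ho, hi]
  · simp [ho]

lemma updL (b : Bool) (v n e p lk gh pf : String) :
    (if b then
      (if (mkD n e p lk gh pf).getD "linkedin" "" == "" then (mkD n e p lk gh pf).insert "linkedin" v
       else mkD n e p lk gh pf)
     else mkD n e p lk gh pf) = mkD n e p (if b = true ∧ lk = "" then v else lk) gh pf := by
  by_cases hb : b = true
  · by_cases hl : lk = "" <;> simp [hb, hl, getD_link, insert_link]
  · simp [hb]

lemma updG (b : Bool) (v n e p lk gh pf : String) :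
    (if b then
      (if (mkD n e p lk gh pf).getD "github" "" == "" then (mkD n e p lk gh pf).insert "github" v
       else mkD n e p lk gh pf)
     else mkD n e p lk gh pf) = mkD n e p lk (if b = true ∧ gh = "" then v else gh) pf := by
  by_cases hb : b = true
  · by_cases hg : gh = "" <;> simp [hb, hg, getD_git, insert_git]
  · simp [hb]

lemma updPo (b : Bool) (v n e p lk gh pf : String) :
    (if b then
      (if (mkD n e p lk gh pf).getD "portfolio" "" == "" then (mkD n e p lk gh pf).insert "portfolio" v
       else mkD n e p lk gh pf)
     else mkD n e p lk gh pf) = mkD n e p lk gh (if b = true ∧ pf = "" then v else pf) := by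
  by_cases hb : b = true
  · by_cases hp : pf = "" <;> simp [hb, hp, getD_port, insert_port]
  · simp [hb]

lemma updN (b1 b2 b3 inn : Bool) (v n e p lk gh pf : String) :
    (if (mkD n e p lk gh pf).getD "name" "" == "" && b1 && b2 && b3 then
      (if inn then (mkD n e p lk gh pf).insert "name" v else mkD n e p lk gh pf)
     else mkD n e p lk gh pf) =
      mkD (if n = "" ∧ (b1 && b2 && b3 && inn) = true then v else n) e p lk gh pf := by
  by_cases hn : n = ""
  · by_cases h1 : b1 = true
    · by_cases h2 : b2 = true
      · by_cases h3 : b3 = true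
        · by_cases hi : inn = true <;>
            simp [hn, h1, h2, h3, hi, getD_name, insert_name]
        · simp [hn, h1, h2, h3, getD_name]
      · simp [hn, h1, h2, getD_name]
    · simp [hn, h1, getD_name]
  · simp [hn, getD_name]

-- one loop iteration of A, expressed on the componentwise dict
lemma stepA_mkD (i : Int) (x n e p lk gh pf : String) :
    stepA (mkD n e p lk gh pf) (i, x) =
      mkD (if n = "" ∧ i < 5 ∧ nameP (PySem.Str.strip x) = true then PySem.Str.strip x else n)
        (if e = "" ∧ emailP (PySem.Str.strip x) = true then emailVal (PySem.Str.strip x) else e)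
        (if p = "" ∧ phoneP (PySem.Str.strip x) = true then PySem.Str.strip x else p)
        (if lk = "" ∧ linkP (PySem.Str.strip x) = true then PySem.Str.strip x else lk)
        (if gh = "" ∧ gitP (PySem.Str.strip x) = true then PySem.Str.strip x else gh)
        (if pf = "" ∧ portP (PySem.Str.strip x) = true then PySem.Str.strip x else pf) := by
  have hsi := strip_idem x
  simp only [stepA, updE, updP, updL, updG, updPo, updN]
  apply mkD_congr
  · refine if_congr ?_ rfl rfl
    simp only [nameP, Bool.and_eq_true, decide_eq_true_eq, and_assoc, and_comm, and_left_comm]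
  · refine if_congr ?_ rfl rfl
    simp only [emailP, Bool.and_eq_true, and_comm]
  · refine if_congr ?_ rfl rfl
    simp only [phoneP, Bool.and_eq_true, and_assoc, and_comm, and_left_comm, and_self_left]
  · refine if_congr ?_ hsi rfl
    simp only [linkP, and_comm]
  · refine if_congr ?_ hsi rfl
    simp only [gitP, and_comm]
  · refine if_congr ?_ hsi rfl
    simp only [portP, and_comm]

lemma foldA (ls : List String) : ∀ (i : Int) (n e p lk gh pf : String),
    (PySem.List.enumerate ls i).foldl stepA (mkD n e p lk gh pf) =
      mkD (if n = "" then nameFrom i ls else n)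
        (if e = "" then emailVal (firstMatch emailP (ls.map PySem.Str.strip)) else e)
        (if p = "" then firstMatch phoneP (ls.map PySem.Str.strip) else p)
        (if lk = "" then firstMatch linkP (ls.map PySem.Str.strip) else lk)
        (if gh = "" then firstMatch gitP (ls.map PySem.Str.strip) else gh)
        (if pf = "" then firstMatch portP (ls.map PySem.Str.strip) else pf) := by
  induction ls with
  | nil =>
    intro i n e p lk gh pf
    rw [PySem.List.enumerate_nil, List.foldl_nil]
    apply mkD_congr <;> simp only [List.map_nil, nameFrom, firstMatch] <;>
      (split_ifs <;> simp_all [emailVal]) <;> decide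
  | cons l t ih =>
    intro i n e p lk gh pf
    rw [PySem.List.enumerate_cons, List.foldl_cons, stepA_mkD, ih (i + 1)]
    simp only [List.map_cons]
    apply mkD_congr
    · -- name
      rw [nameFrom]
      by_cases hn : n = ""
      · by_cases h5 : i < 5
        · by_cases hp : nameP (PySem.Str.strip l) = true
          · have hne := nameP_ne_empty _ hp
            simp [hn, h5, hp, hne]
          · simp [hn, h5, hp]
        · simp [hn, h5]
      · simp [hn]
    · -- email
      by_cases he : e = ""
      · by_cases hp : emailP (PySem.Str.strip l) = true
        · have hne := emailVal_ne_empty _ hp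
          simp [he, hp, firstMatch, hne]
        · simp [he, hp, firstMatch]
      · simp [he]
    · -- phone
      by_cases hq : p = ""
      · by_cases hp : phoneP (PySem.Str.strip l) = true
        · have hne := phoneP_ne_empty _ hp
          simp [hq, hp, firstMatch, hne]
        · simp [hq, hp, firstMatch]
      · simp [hq]
    · -- linkedin
      by_cases hq : lk = ""
      · by_cases hp : linkP (PySem.Str.strip l) = true
        · have hne := linkP_ne_empty _ hp
          simp [hq, hp, firstMatch, hne]
        · simp [hq, hp, firstMatch]
      · simp [hq]
    · -- github
      by_cases hq : gh = ""
      · by_cases hp : gitP (PySem.Str.strip l) = true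
        · have hne := gitP_ne_empty _ hp
          simp [hq, hp, firstMatch, hne]
        · simp [hq, hp, firstMatch]
      · simp [hq]
    · -- portfolio
      by_cases hq : pf = ""
      · by_cases hp : portP (PySem.Str.strip l) = true
        · have hne := portP_ne_empty _ hp
          simp [hq, hp, firstMatch, hne]
        · simp [hq, hp, firstMatch]
      · simp [hq]

lemma nameFrom_eq (ls : List String) : ∀ (i : Int), 0 ≤ i →
    nameFrom i ls = firstName ((ls.map PySem.Str.strip).take ((5 - i).toNat)) := by
  induction ls with
  | nil => intro i _; simp [nameFrom, firstName]
  | cons l t ih =>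
    intro i hi
    by_cases h5 : i < 5
    · have : (5 - i).toNat = (5 - (i + 1)).toNat + 1 := by omega
      rw [nameFrom, this]
      simp only [List.map_cons, List.take_succ_cons, firstName]
      by_cases hn : nameP (PySem.Str.strip l) = true
      · simp [h5, hn]
      · simp [h5, hn, ih (i + 1) (by omega)]
    · have h0 : (5 - i).toNat = 0 := by omega
      rw [nameFrom, h0]
      simp only [List.take_zero, firstName]
      have := ih (i + 1) (by omega)
      have h1 : (5 - (i + 1)).toNat = 0 := by omega
      rw [h1, List.take_zero, firstName] at this
      simp [h5, this]

-- ===== VERDICT (by name: the statement is the Claim_ definition above) =====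
theorem parse_resume_text_spec : Claim_equal_parse_resume_text := by
  intro text _
  have h0 : (PySem.Dict.ofList [("name", ""), ("email", ""), ("phone", ""), ("location", ""),
      ("linkedin", ""), ("github", ""), ("portfolio", ""), ("summary", "")] :
      PySem.Dict String String) = mkD "" "" "" "" "" "" := rfl
  have hname := nameFrom_eq ((PySem.Str.split? text "\n").getD []) 0 (by norm_num)
  rw [show ((5 : Int) - 0).toNat = 5 from rfl] at hname
  have hslice : PySem.List.slice ((((PySem.Str.split? text "\n").getD []).map PySem.Str.strip))
      none (some 5) = ((((PySem.Str.split? text "\n").getD []).map PySem.Str.strip)).take 5 := by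
    rw [PySem.List.slice_to _ (by norm_num), show (5 : Int).toNat = 5 from rfl]
  simp only [Spec_parse_resume_text, parse_resume_text, parse_resume_text_alt]
  rw [h0, foldA ((PySem.Str.split? text "\n").getD []) 0, items_mkD]
  simp [hname, hslice, emailVal]
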